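-- pv_equiv track=rewrite | github.com/cirosantilli/project-euler-solvers | solvers/253.py | _initial_transitions
-- ===== SOURCE A (Python) =====
-- from collections import defaultdict
-- from typing import DefaultDict, Dict, List, Optional, Tuple
--
-- State = Optional[Tuple[int, int, Tuple[int, ...]]]
--
-- def _canon_edges(a: int, b: int) -> Tuple[int, int]:
--     return (a, b) if a <= b else (b, a)
--
-- def _initial_transitions(n: int) -> List[Tuple[State, int]]:
--     """Transitions from the empty state (no pieces placed yet)."""
--     mult: Dict[State, int] = defaultdict(int)
--     for p in range(n):
--         left = p
--         right = n - 1 - p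
--         e0, e1 = _canon_edges(left, right)
--         st: State = (e0, e1, ())
--         mult[st] += 1
--     return list(mult.items())
-- ===== SOURCE B (Python) =====
-- def _canon_edges(a, b):
--     return (a, b) if a <= b else (b, a)
--
-- def _initial_transitions(n):
--     """By symmetry p <-> n-1-p, enumerate only the first half of positions and
--     emit each canonical state once with its multiplicity (1 for the middle)."""
--     out = []
--     for p in range((n + 1) // 2):
--         left = p
--         right = n - 1 - p
--         e0, e1 = _canon_edges(left, right)
--         out.append(((e0, e1, ()), 1 if left == right else 2))
--     return out
-- ===== Notes on version B (the rewrite author's own statement) =====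
-- stated objective: alternative
-- what changed: Instead of iterating all n positions and counting states in a defaultdict, B iterates only the first half of the positions (symmetric pairs) and emits each canonical state once together with its multiplicity derived from the symmetry, with no dict at all.
import Mathlib
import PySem

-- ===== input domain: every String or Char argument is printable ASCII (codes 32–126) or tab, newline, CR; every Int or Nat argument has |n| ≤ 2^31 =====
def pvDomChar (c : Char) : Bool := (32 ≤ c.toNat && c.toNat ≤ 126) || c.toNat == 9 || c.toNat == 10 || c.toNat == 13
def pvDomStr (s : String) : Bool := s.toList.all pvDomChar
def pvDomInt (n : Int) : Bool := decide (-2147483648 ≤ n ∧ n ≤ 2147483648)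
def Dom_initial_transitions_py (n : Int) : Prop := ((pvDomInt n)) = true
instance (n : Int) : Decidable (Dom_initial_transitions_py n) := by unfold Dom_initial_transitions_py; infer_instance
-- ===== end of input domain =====

-- B halves the loop (positions p and n-1-p give the same state) and emits each state's
-- multiplicity directly instead of counting in a dict.

-- ===== PORT A =====
def canonEdges (a b : Int) : Int × Int := if a ≤ b then (a, b) else (b, a)

def initial_transitions_py (n : Int) : List ((Option (Int × Int × List Int)) × Int) :=
  let mult : PySem.Dict (Option (Int × Int × List Int)) Int :=
    (PySem.List.pyRange 0 n 1).foldl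
      (fun d p =>
        let left := p
        let right := n - 1 - p
        let e := canonEdges left right
        let st : Option (Int × Int × List Int) := some (e.1, e.2, [])
        d.modify st 0 (· + 1))
      PySem.Dict.empty
  mult.items

-- ===== PORT B =====
def initial_transitions_py_alt (n : Int) : List ((Option (Int × Int × List Int)) × Int) :=
  (PySem.List.pyRange 0 (PySem.Int.floordiv (n + 1) 2) 1).foldl
    (fun out p =>
      let left := p
      let right := n - 1 - p
      let e := canonEdges left right
      out ++ [((some (e.1, e.2, [])), if left = right then 1 else 2)])
    []

-- ===== PRECONDITION & SPEC =====
def Spec_initial_transitions_py (n : Int) (out : List ((Option (Int × Int × List Int)) × Int)) : Prop := out = initial_transitions_py_alt n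
instance (n : Int) (out : List ((Option (Int × Int × List Int)) × Int)) : Decidable (Spec_initial_transitions_py n out) := by unfold Spec_initial_transitions_py; infer_instance

-- ===== CLAIM (what is proved, stated in full; the proofs are below) =====
def Claim_equal_initial_transitions_py : Prop := ∀ (n : Int), Dom_initial_transitions_py n → Spec_initial_transitions_py n (initial_transitions_py n)

-- ===== LEMMAS AND PROOFS =====

-- the state produced at position p
def stf (n p : Int) : Option (Int × Int × List Int) :=
  some ((canonEdges p (n - 1 - p)).1, (canonEdges p (n - 1 - p)).2, [])

theorem stf_eq_iff (n p q : Int) : stf n q = stf n p ↔ q = p ∨ q = n - 1 - p := by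
  simp [stf, canonEdges, Prod.ext_iff]
  split_ifs <;> omega

theorem update_of_subset {α : Type} [BEq α] [LawfulBEq α] (s : PySem.Set α) (ys : List α)
    (h : ∀ y ∈ ys, y ∈ s) : PySem.Set.update s ys = s := by
  induction ys generalizing s with
  | nil => rfl
  | cons y t ih =>
    rw [PySem.Set.update_cons, PySem.Set.add_of_mem (h y (by simp))]
    exact ih s (fun z hz => h z (by simp [hz]))

theorem countP_pair {α : Type} [BEq α] [LawfulBEq α] (l : List α) (a b : α) (h : a ≠ b) :
    l.countP (fun x => x == a || x == b) = l.count a + l.count b := by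
  induction l with
  | nil => simp
  | cons x t ih =>
    by_cases hxa : x = a <;> by_cases hxb : x = b <;>
      simp [ih, hxa, hxb, h, Ne.symm] <;> omega

theorem A_as_counter (n : Int) :
    initial_transitions_py n =
      (PySem.Set.ofList ((PySem.List.pyRange 0 n 1).map (stf n))).map
        (fun k => (k, (((PySem.List.pyRange 0 n 1).map (stf n)).count k : Int))) := by
  have h : initial_transitions_py n =
      (PySem.Dict.counter ((PySem.List.pyRange 0 n 1).map (stf n))).items := by
    unfold initial_transitions_py
    rw [PySem.Dict.counter_eq_foldl, List.foldl_map]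
    rfl
  rw [h, PySem.Dict.items_counter]

theorem B_as_map (n : Int) :
    initial_transitions_py_alt n =
      (PySem.List.pyRange 0 (PySem.Int.floordiv (n + 1) 2) 1).map
        (fun p => (stf n p, if p = n - 1 - p then 1 else 2)) := by
  unfold initial_transitions_py_alt
  rw [PySem.List.foldl_append_singleton_eq_map]
  rfl

-- ===== VERDICT (by name: the statement is the Claim_ definition above) =====
theorem initial_transitions_py_spec : Claim_equal_initial_transitions_py := by
  intro n _
  unfold Spec_initial_transitions_py
  rw [A_as_counter, B_as_map]
  set m := PySem.Int.floordiv (n + 1) 2 with hm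
  by_cases hn : n ≤ 0
  · have hm0 : m < 1 := by
      rw [hm, PySem.Int.floordiv_lt_iff_lt_mul (by norm_num)]; omega
    rw [PySem.List.pyRange_one_eq_nil (by omega), PySem.List.pyRange_one_eq_nil (by omega)]
    rfl
  · -- bounds on m : n ≤ 2*m ∧ 2*m ≤ n+1
    have hb : m * 2 ≤ n + 1 ∧ n + 1 < (m + 1) * 2 :=
      (PySem.Int.floordiv_eq_iff_of_pos (by norm_num)).mp hm.symm
    have h0m : 0 < m := by omega
    have hmn : m ≤ n := by omega
    have hsplit : PySem.List.pyRange 0 n 1 =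
        PySem.List.pyRange 0 m 1 ++ PySem.List.pyRange m n 1 :=
      PySem.List.pyRange_one_append 0 m n (by omega) hmn
    have hFnodup : ((PySem.List.pyRange 0 m 1).map (stf n)).Nodup := by
      apply List.Nodup.map_on _ (PySem.List.nodup_pyRange_one 0 m)
      intro p hp q hq hpq
      rw [PySem.List.mem_pyRange_one] at hp hq
      rcases (stf_eq_iff n q p).mp hpq with h | h <;> omega
    have hofList : PySem.Set.ofList ((PySem.List.pyRange 0 n 1).map (stf n)) =
        (PySem.List.pyRange 0 m 1).map (stf n) := by
      rw [hsplit, List.map_append, PySem.Set.ofList_append,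
          PySem.Set.ofList_eq_self_of_nodup _ hFnodup]
      apply update_of_subset
      intro y hy
      simp only [List.mem_map] at hy ⊢
      obtain ⟨q, hq, rfl⟩ := hy
      rw [PySem.List.mem_pyRange_one] at hq
      refine ⟨n - 1 - q, ?_, ?_⟩
      · rw [PySem.List.mem_pyRange_one]; omega
      · exact (stf_eq_iff n q (n - 1 - q)).mpr (Or.inr rfl)
    have hcount : ∀ p : Int, 0 ≤ p → p < m →
        ((PySem.List.pyRange 0 n 1).map (stf n)).count (stf n p) =
          if p = n - 1 - p then 1 else 2 := by
      intro p h0 hpm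
      have hmemp : p ∈ PySem.List.pyRange 0 n 1 := by
        rw [PySem.List.mem_pyRange_one]; omega
      have hmemq : n - 1 - p ∈ PySem.List.pyRange 0 n 1 := by
        rw [PySem.List.mem_pyRange_one]; omega
      rw [List.count_eq_countP, List.countP_map,
          List.countP_congr (q := fun x => x == p || x == n - 1 - p)
            (fun q _ => by simp [stf_eq_iff])]
      by_cases hself : p = n - 1 - p
      · rw [if_pos hself,
            List.countP_congr (q := fun x => x == p)
              (fun q _ => by rw [← hself]; simp),
            ← List.count_eq_countP,
            List.count_eq_one_of_mem (PySem.List.nodup_pyRange_one 0 n) hmemp]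
      · rw [if_neg hself, countP_pair _ _ _ hself,
            List.count_eq_one_of_mem (PySem.List.nodup_pyRange_one 0 n) hmemp,
            List.count_eq_one_of_mem (PySem.List.nodup_pyRange_one 0 n) hmemq]
    rw [hofList, List.map_map]
    apply List.map_congr_left
    intro p hp
    rw [PySem.List.mem_pyRange_one] at hp
    simp only [Function.comp_apply]
    rw [hcount p hp.1 hp.2]
    split_ifs <;> norm_num
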